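-- pv_equiv track=rewrite | github.com/PinoNTK/NewUpdate | Api_Extraction/extraction/en/person_detail.py | detect_address
-- ===== SOURCE A (Python) =====
-- address_key = ['address','nationality']
--
-- address_end = ['.','gender','mobile','mail','date','day','birth']
--
-- def detect_address(text):
--     flag = False
--     text = text.split()
--     for i, token in enumerate(text):
--         if token.lower() in address_key:
--             flag = True
--             address = ''
--             for w in text[i + 1:]:
--                 if w[-1] != '.' and w.lower() not in address_end:
--                     address += ' ' + w
--                 else:
--                     return address
--             return address
--     return None
-- ===== SOURCE B (Python) =====
-- address_key = ['address','nationality']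
--
-- address_end = ['.','gender','mobile','mail','date','day','birth']
--
-- def detect_address(text):
--     tokens = text.split()
--     idx = next((i for i, t in enumerate(tokens) if t.lower() in address_key), None)
--     if idx is None:
--         return None
--     end = idx + 1
--     while end < len(tokens) and tokens[end][-1] != '.' and tokens[end].lower() not in address_end:
--         end += 1
--     words = tokens[idx + 1:end]
--     return ' ' + ' '.join(words) if words else ''
-- ===== Notes on version B (the rewrite author's own statement) =====
-- stated objective: simpler
-- what changed: Replaces A's nested enumerate loop with string accumulation by a phase-separated pipeline: find the keyword index, advance an end index over the kept run, then slice and join the words once.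
import Mathlib
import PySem

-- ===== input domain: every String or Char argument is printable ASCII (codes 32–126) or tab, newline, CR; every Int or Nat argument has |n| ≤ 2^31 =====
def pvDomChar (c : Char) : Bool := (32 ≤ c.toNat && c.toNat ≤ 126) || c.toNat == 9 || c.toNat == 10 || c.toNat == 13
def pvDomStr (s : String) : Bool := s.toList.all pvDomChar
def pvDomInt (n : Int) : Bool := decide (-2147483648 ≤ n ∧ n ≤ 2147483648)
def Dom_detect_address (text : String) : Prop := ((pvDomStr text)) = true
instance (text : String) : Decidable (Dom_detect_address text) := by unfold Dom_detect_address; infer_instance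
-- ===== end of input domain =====

-- B phase-separates A's nested loops (find keyword index, advance an end index, slice + join); objective: simpler, same cost.


-- module constants (same in both Pythons)
def addressKey : List String := ["address", "nationality"]
def addressEnd : List String := [".", "gender", "mobile", "mail", "date", "day", "birth"]

-- token.lower() in address_key
def pvIsKey (t : String) : Bool := addressKey.contains (PySem.Str.lower t)
-- w[-1] != '.' and w.lower() not in address_end  (the identical condition appears in both Pythons)
def pvKeep (w : String) : Bool :=
  (PySem.Str.pyGet? w (-1) != some '.') && !(addressEnd.contains (PySem.Str.lower w))

-- ===== PORT A =====
-- inner 'for w in text[i+1:]' loop with accumulator address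
def detectInnerA (address : String) (rest : List String) : String :=
  match rest with
  | [] => address
  | w :: ws => if pvKeep w then detectInnerA (address ++ (" " ++ w)) ws else address

-- outer 'for i, token in enumerate(text)' loop
def detectOuterA (tokens : List String) (en : List (Int × String)) : Option String :=
  match en with
  | [] => none
  | (i, token) :: rest =>
      if pvIsKey token then
        some (detectInnerA "" (PySem.List.slice tokens (some (i + 1)) none))
      else detectOuterA tokens rest

def detect_address (text : String) : Option String :=
  let tokens := PySem.Str.split₀ text
  detectOuterA tokens (PySem.List.enumerate tokens 0)

-- ===== PORT B =====
-- 'while end < len(tokens) and tokens[end][-1] != '.' and tokens[end].lower() not in address_end: end += 1'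
def altEndB (tokens : List String) (e : Nat) : Nat :=
  if h : e < tokens.length then
    if pvKeep tokens[e] then altEndB tokens (e + 1) else e
  else e
termination_by tokens.length - e

def detect_address_alt (text : String) : Option String :=
  let tokens := PySem.Str.split₀ text
  match tokens.findIdx? pvIsKey with
  | none => none
  | some idx =>
      let e := altEndB tokens (idx + 1)
      let words := PySem.List.slice tokens (some ((idx : Int) + 1)) (some (e : Int))
      some (if words.isEmpty then "" else " " ++ PySem.Str.join " " words)

-- ===== PRECONDITION & SPEC =====
def Spec_detect_address (text : String) (out : Option String) : Prop := out = detect_address_alt text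
instance (text : String) (out : Option String) : Decidable (Spec_detect_address text out) := by unfold Spec_detect_address; infer_instance

-- ===== CLAIM (what is proved, stated in full; the proofs are below) =====
def Claim_equal_detect_address : Prop := ∀ (text : String), Dom_detect_address text → Spec_detect_address text (detect_address text)



-- ===== LEMMAS AND PROOFS =====

-- proof-only rendering of the accumulated address: one ' ' + w per kept word
def glue : List String → String
  | [] => ""
  | w :: ws => (" " ++ w) ++ glue ws

theorem take_length_takeWhile {α : Type} (p : α → Bool) (l : List α) :
    l.take (l.takeWhile p).length = l.takeWhile p := by
  induction l with
  | nil => simp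
  | cons x xs ih => by_cases h : p x <;> simp [h, ih]

theorem inner_eq (l : List String) : ∀ acc, detectInnerA acc l = acc ++ glue (l.takeWhile pvKeep) := by
  induction l with
  | nil => intro acc; simp [detectInnerA, glue]
  | cons w ws ih =>
    intro acc
    by_cases h : pvKeep w
    · simp only [detectInnerA, h, if_true, ih, List.takeWhile_cons, glue]
      apply String.toList_inj.mp
      simp [String.toList_append]
    · simp [detectInnerA, h, glue]

theorem glue_toList (ws : List String) (h : ws ≠ []) :
    (glue ws).toList = ' ' :: PySem.Chars.join [' '] (ws.map String.toList) := by
  induction ws with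
  | nil => exact absurd rfl h
  | cons w ws ih =>
    cases ws with
    | nil => simp [glue, PySem.Chars.join_singleton, String.toList_append]
    | cons v vs =>
      have ih' := ih (by simp)
      have hg : glue (w :: v :: vs) = (" " ++ w) ++ glue (v :: vs) := rfl
      rw [hg, String.toList_append, String.toList_append, ih']
      simp [PySem.Chars.join_cons_cons]

theorem glue_join (ws : List String) :
    glue ws = if ws.isEmpty then "" else " " ++ PySem.Str.join " " ws := by
  cases ws with
  | nil => rfl
  | cons w ws =>
    apply String.toList_inj.mp
    simp [glue_toList (w :: ws) (by simp), PySem.Str.toList_join, String.toList_append]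

theorem altEnd_eq (n : Nat) : ∀ (tokens : List String) (e : Nat), tokens.length - e ≤ n →
    altEndB tokens e = e + ((tokens.drop e).takeWhile pvKeep).length := by
  induction n with
  | zero =>
    intro tokens e hn
    rw [altEndB, dif_neg (by omega)]
    simp [List.drop_eq_nil_of_le (by omega : tokens.length ≤ e)]
  | succ n ih =>
    intro tokens e hn
    rw [altEndB]
    by_cases h : e < tokens.length
    · rw [dif_pos h]
      rw [List.drop_eq_getElem_cons h]
      have ihe := ih tokens (e + 1) (by omega)
      by_cases hk : pvKeep tokens[e]
      · rw [if_pos hk, ihe, List.takeWhile_cons, if_pos hk, List.length_cons]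
        omega
      · rw [if_neg hk, List.takeWhile_cons, if_neg hk]
        simp
    · rw [dif_neg h]
      simp [List.drop_eq_nil_of_le (by omega : tokens.length ≤ e)]

theorem outer_eq : ∀ (rest : List String) (s : Nat) (tokens : List String), tokens.drop s = rest →
    detectOuterA tokens (PySem.List.enumerate rest (s : Int)) =
      (rest.findIdx? pvIsKey).map (fun j => detectInnerA "" (tokens.drop (s + j + 1))) := by
  intro rest
  induction rest with
  | nil => intro s tokens _; simp [PySem.List.enumerate_nil, detectOuterA]
  | cons t ts ih =>
    intro s tokens hdrop
    rw [PySem.List.enumerate_cons, detectOuterA]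
    have hc : ((s : Int) + 1) = (((s + 1 : Nat)) : Int) := by push_cast; ring
    by_cases h : pvIsKey t
    · rw [if_pos h, hc, PySem.List.slice_from_natCast]
      simp [List.findIdx?_cons, h]
    · rw [if_neg h]
      have hts : tokens.drop (s + 1) = ts := by
        rw [← List.tail_drop, hdrop]; rfl
      rw [hc, ih (s + 1) tokens hts]
      rcases hf : ts.findIdx? pvIsKey with _ | j
      · simp [List.findIdx?_cons, h, hf]
      · simp only [List.findIdx?_cons, h, if_false, Bool.false_eq_true, hf, Option.map_some]
        have harith : s + 1 + j + 1 = s + (j + 1) + 1 := by omega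
        simp [harith]

theorem detect_address_eq : ∀ text, detect_address text = detect_address_alt text := by
  intro text
  unfold detect_address detect_address_alt
  set tokens := PySem.Str.split₀ text with htok
  have h0 : tokens.drop 0 = tokens := by simp
  have hO := outer_eq tokens 0 tokens h0
  simp only [Nat.cast_zero] at hO
  rw [hO]
  rcases hf : tokens.findIdx? pvIsKey with _ | idx
  · simp only [hf, Option.map_none]
  · simp only [hf, Option.map_some]
    have hend : altEndB tokens (idx + 1)
        = (idx + 1) + ((tokens.drop (idx + 1)).takeWhile pvKeep).length :=
      altEnd_eq tokens.length tokens (idx + 1) (by omega)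
    have hcast : ((idx : Int) + 1) = (((idx + 1 : Nat)) : Int) := by push_cast; ring
    rw [hend, hcast, PySem.List.slice_natCast, Nat.add_sub_cancel_left, take_length_takeWhile]
    simp only [Nat.zero_add]
    rw [inner_eq, glue_join]
    congr 1


-- ===== VERDICT (by name: the statement is the Claim_ definition above) =====
theorem detect_address_spec : Claim_equal_detect_address := by
  intro text _
  exact detect_address_eq text
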